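-- pv_equiv track=rewrite | github.com/nhkduy201/Project2-Intro-AI | main.py | get_cons_clauses
-- ===== SOURCE A (Python) =====
-- def get_comb(arr, k):
--     if k == 0:
--         return [[]]
--
--     combs = []
--
--     def comb_utl(arr, k, i, kth, v):
--         for j in range(i, len(arr) - kth):
--             if kth == 0:
--                 combs.append(v + [arr[j]])
--                 continue
--             comb_utl(arr, k, j + 1, kth - 1, v + [arr[j]])
--     comb_utl(arr, k, 0, k - 1, [])
--     return combs
--
-- def get_cons_clauses(adj, gre):
--     if gre == len(adj):
--         return [[a] for a in adj]
--     elif gre == 0: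
--         return [[-a] for a in adj]
--     clauses = []
--     red = len(adj) - gre
--     for i in range(red):
--         combs = get_comb(adj, i)
--         for comb in combs:
--             clause = []
--             for a in adj:
--                 if a in comb:
--                     clause.append(a)
--                 else:
--                     clause.append(-a)
--             clauses.append(clause)
--     return clauses
-- ===== SOURCE B (Python) =====
-- def get_cons_clauses(adj, gre):
--     n = len(adj)
--     if gre == n:
--         return [[a] for a in adj]
--     elif gre == 0:
--         return [[-a] for a in adj]
--     clauses = []
--     neg = [-a for a in adj]
--     clause = neg[:]
--
--     def emit(start, remaining):
--         if remaining == 0: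
--             clauses.append(clause[:])
--             return
--         for j in range(start, n - remaining + 1):
--             clause[j] = adj[j]
--             emit(j + 1, remaining - 1)
--             clause[j] = neg[j]
--
--     for size in range(n - gre):
--         emit(0, size)
--     return clauses
-- ===== Notes on version B (the rewrite author's own statement) =====
-- stated objective: faster
-- what changed: B enumerates index combinations directly with a flip-and-undo shared clause (each clause starts all-negative and only the chosen positions are flipped), instead of materialising value combinations per size and rescanning each combination for every element of every clause.
import Mathlib
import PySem

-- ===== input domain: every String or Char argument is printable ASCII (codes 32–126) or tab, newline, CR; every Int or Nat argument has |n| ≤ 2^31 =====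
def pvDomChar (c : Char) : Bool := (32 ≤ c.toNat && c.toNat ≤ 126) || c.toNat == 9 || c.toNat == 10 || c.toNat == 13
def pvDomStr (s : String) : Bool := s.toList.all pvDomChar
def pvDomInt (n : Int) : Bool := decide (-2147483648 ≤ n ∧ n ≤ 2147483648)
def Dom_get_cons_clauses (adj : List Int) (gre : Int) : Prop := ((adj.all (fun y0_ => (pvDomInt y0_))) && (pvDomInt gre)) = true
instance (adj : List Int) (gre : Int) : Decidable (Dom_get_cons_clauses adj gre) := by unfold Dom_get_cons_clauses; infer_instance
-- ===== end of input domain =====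

-- B builds each clause as the all-negative list and flips the chosen positions while
-- enumerating index combinations directly (with undo), instead of regenerating value
-- combinations per size and rescanning each combination for every clause element
-- (objective: faster; return-value equivalence).

-- ===== PORT A =====
-- comb_utl appends to the nonlocal `combs`; ported as returning the combinations it appends, in order.
-- arr[j] with j drawn from range(i, len(arr)-kth) is always in range, so getD is exact here.
def combUtl (arr : List Int) (k : Int) (kth start : Nat) (v : List Int) : List (List Int) :=
  (List.range' start (arr.length - kth - start)).flatMap (fun j =>
    if _h : kth = 0 then [v ++ [arr.getD j 0]]       -- arr[j], j always in range here
    else combUtl arr k (kth - 1) (j + 1) (v ++ [arr.getD j 0]))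
termination_by kth

def get_comb (arr : List Int) (k : Int) : List (List Int) :=
  if k = 0 then [[]]
  else combUtl arr k (k - 1).toNat 0 []

def get_cons_clauses (adj : List Int) (gre : Int) : List (List Int) :=
  if gre = (adj.length : Int) then adj.map (fun a => [a])
  else if gre = 0 then adj.map (fun a => [-a])
  else
    (PySem.List.pyRange 0 ((adj.length : Int) - gre) 1).flatMap (fun i =>
      (get_comb adj i).map (fun comb =>
        adj.map (fun a => if comb.contains a then a else -a)))


-- ===== PORT B =====
-- emit mutates the shared `clauses` and `clause` (flip, recurse, undo); ported as threading
-- the state pair (clauses, clause). clause[j] = adj[j] / neg[j] assignments are in range (j < n).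
def emitB (adj neg : List Int) (remaining start : Nat)
    (st : List (List Int) × List Int) : List (List Int) × List Int :=
  if _h : remaining = 0 then (st.1 ++ [st.2], st.2)
  else (List.range' start (adj.length + 1 - remaining - start)).foldl
    (fun st j =>
      let st' := emitB adj neg (remaining - 1) (j + 1) (st.1, st.2.set j (adj.getD j 0))
      (st'.1, st'.2.set j (neg.getD j 0))) st
termination_by remaining

def get_cons_clauses_alt (adj : List Int) (gre : Int) : List (List Int) :=
  if gre = (adj.length : Int) then adj.map (fun a => [a])
  else if gre = 0 then adj.map (fun a => [-a])
  else
    let neg := adj.map (fun a => -a)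
    ((PySem.List.pyRange 0 ((adj.length : Int) - gre) 1).foldl
      (fun st size => emitB adj neg size.toNat 0 st) ([], neg)).1

-- ===== PRECONDITION & SPEC =====
-- Pre_ excludes lists with duplicate entries (except in the branches where duplicates cannot
-- matter): on duplicates A's value-based membership test flags every copy of a chosen element

-- ===== PRECONDITION & SPEC =====
-- Pre_ excludes lists with duplicate entries (except where duplicates cannot matter: gre = 0 or
-- gre ≥ len-1): on duplicates A's value-based membership flags every copy of a chosen element
-- positive while B flags exactly the chosen position — an unspecifiable corner where either
-- reading is defensible.
def Pre_get_cons_clauses (adj : List Int) (gre : Int) : Prop :=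
  adj.Nodup ∨ gre = 0 ∨ (adj.length : Int) - 1 ≤ gre
instance (adj : List Int) (gre : Int) : Decidable (Pre_get_cons_clauses adj gre) := by
  unfold Pre_get_cons_clauses; infer_instance

def pvWitness_get_cons_clauses : List Int × Int := ([1, 2, 3], 1)

def Spec_get_cons_clauses (adj : List Int) (gre : Int) (out : List (List Int)) : Prop := out = get_cons_clauses_alt adj gre
instance (adj : List Int) (gre : Int) (out : List (List Int)) : Decidable (Spec_get_cons_clauses adj gre out) := by unfold Spec_get_cons_clauses; infer_instance

-- ===== CLAIM (what is proved, stated in full; the proofs are below) =====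
def Claim_equal_get_cons_clauses : Prop := ∀ (adj : List Int) (gre : Int), Dom_get_cons_clauses adj gre → Pre_get_cons_clauses adj gre → Spec_get_cons_clauses adj gre (get_cons_clauses adj gre)

-- ===== LEMMAS AND PROOFS =====
def negL (adj : List Int) : List Int := adj.map (fun a => -a)
def flipL (adj : List Int) (chosen : List Nat) : List Int :=
  chosen.foldl (fun cs j => cs.set j (adj.getD j 0)) (negL adj)
def clauseA (adj comb : List Int) : List Int :=
  adj.map (fun a => if comb.contains a then a else -a)

lemma foldl_set_length (f : Nat → Int) (chosen : List Nat) (cs : List Int) :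
    (chosen.foldl (fun cs j => cs.set j (f j)) cs).length = cs.length := by
  induction chosen generalizing cs with
  | nil => rfl
  | cons j rest ih => simp [List.foldl_cons, ih]

lemma foldl_set_getElem? (f : Nat → Int) (chosen : List Nat) (cs : List Int) (t : Nat) :
    (chosen.foldl (fun cs j => cs.set j (f j)) cs)[t]? =
      if t ∈ chosen ∧ t < cs.length then some (f t) else cs[t]? := by
  induction chosen generalizing cs with
  | nil => simp
  | cons j rest ih =>
    rw [List.foldl_cons, ih]
    simp only [List.length_set, List.mem_cons]
    by_cases h1 : t ∈ rest <;> by_cases h2 : t < cs.length <;> by_cases h3 : t = j <;>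
      simp_all [List.getElem?_set] <;> first | omega | rw [List.getElem_set_ne (by omega)]
lemma flipL_append (adj : List Int) (chosen : List Nat) (j : Nat) :
    flipL adj (chosen ++ [j]) = (flipL adj chosen).set j (adj.getD j 0) := by
  simp [flipL, List.foldl_append]

lemma length_flipL (adj : List Int) (chosen : List Nat) :
    (flipL adj chosen).length = adj.length := by
  simp [flipL, foldl_set_length, negL]

lemma flipL_getElem? (adj : List Int) (chosen : List Nat) (t : Nat) :
    (flipL adj chosen)[t]? =
      if t ∈ chosen ∧ t < adj.length then some (adj.getD t 0) else (negL adj)[t]? := by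
  rw [flipL, foldl_set_getElem?]
  simp [negL]

lemma clauseA_eq_flipL (adj : List Int) (hnd : adj.Nodup) (chosen : List Nat)
    (hlt : ∀ j ∈ chosen, j < adj.length) :
    clauseA adj (chosen.map (fun j => adj.getD j 0)) = flipL adj chosen := by
  apply List.ext_getElem?
  intro t
  rw [flipL_getElem?]
  by_cases ht : t < adj.length
  · have hget : (clauseA adj (chosen.map (fun j => adj.getD j 0)))[t]? =
        some (if (chosen.map (fun j => adj.getD j 0)).contains adj[t] then adj[t] else -adj[t]) := by
      simp [clauseA, List.getElem?_eq_getElem ht]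
    rw [hget]
    have hmem : (chosen.map (fun j => adj.getD j 0)).contains adj[t] = (t ∈ chosen : Bool) := by
      simp only [List.contains_eq_mem, List.mem_map, decide_eq_decide]
      constructor
      · rintro ⟨j, hj, hval⟩
        have hjl := hlt j hj
        have hjt : adj[j] = adj[t] := by rwa [List.getD_eq_getElem adj 0 hjl] at hval
        have : j = t := (List.Nodup.getElem_inj_iff hnd).mp hjt
        exact this ▸ hj
      · intro htc
        exact ⟨t, htc, by rw [List.getD_eq_getElem adj 0 ht]⟩
    rw [hmem]
    by_cases hc : t ∈ chosen <;>
      simp [hc, ht, negL, List.getElem?_eq_getElem ht, List.getD_eq_getElem adj 0 ht]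
  · have h1 : (clauseA adj (chosen.map (fun j => adj.getD j 0)))[t]? = none := by
      simp [clauseA, List.getElem?_eq_none_iff]; omega
    have h2 : ((negL adj))[t]? = none := by
      simp [negL, List.getElem?_eq_none_iff]; omega
    rw [if_neg (fun h => ht h.2), h2]; exact h1
lemma flipL_set_back (adj : List Int) (chosen : List Nat) (j : Nat) (hj : j ∉ chosen) :
    (flipL adj (chosen ++ [j])).set j ((negL adj).getD j 0) = flipL adj chosen := by
  rw [flipL_append, List.set_set]
  apply List.ext_getElem?
  intro t
  rw [List.getElem?_set]
  by_cases htj : t = j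
  · subst htj
    rw [flipL_getElem?]
    by_cases ht : t < adj.length
    · simp [hj, ht, length_flipL, negL, List.getD_eq_getElem?_getD, List.getElem?_eq_getElem ht]
    · simp [hj, ht, length_flipL, negL, List.getElem?_eq_none_iff.mpr (by simpa using Nat.le_of_not_lt ht)]
  · have hne : j ≠ t := fun h => htj h.symm
    simp [hne]

lemma foldl_step_shape {α : Type} (step : List (List Int) × List Int → α → List (List Int) × List Int)
    (F : α → List (List Int)) (cfix : List Int) :
    ∀ (L : List α), (∀ j ∈ L, ∀ acc, step (acc, cfix) j = (acc ++ F j, cfix)) →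
    ∀ acc, L.foldl step (acc, cfix) = (acc ++ L.flatMap F, cfix) := by
  intro L
  induction L with
  | nil => intro _ acc; simp
  | cons x xs ih =>
    intro h acc
    rw [List.foldl_cons, h x (by simp)]
    rw [ih (fun j hj => h j (by simp [hj]))]
    simp [List.flatMap_cons]

lemma emitB_eq (adj : List Int) (hnd : adj.Nodup) (k : Int) :
    ∀ (kth start : Nat) (chosen : List Nat) (acc : List (List Int)),
    (∀ j ∈ chosen, j < start ∧ j < adj.length) →
    emitB adj (negL adj) (kth + 1) start (acc, flipL adj chosen)
      = (acc ++ (combUtl adj k kth start (chosen.map (fun j => adj.getD j 0))).map (clauseA adj),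
         flipL adj chosen) := by
  intro kth
  induction kth with
  | zero =>
    intro start chosen acc hch
    rw [emitB, combUtl]
    simp only [Nat.add_sub_cancel, Nat.zero_add, reduceDIte]
    rw [foldl_step_shape _
        (fun j => [clauseA adj (chosen.map (fun x => adj.getD x 0) ++ [adj.getD j 0])]) _ _ ?step acc]
    · simp [List.map_flatMap, Nat.sub_zero]
    case step =>
      intro j hj acc'
      have hjb := List.mem_range'_1.mp hj
      have hjn : j < adj.length := by omega
      have hjc : j ∉ chosen := fun hc => by have := hch j hc; omega
      simp only []
      rw [← flipL_append, emitB]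
      simp only [reduceDIte]
      rw [flipL_set_back adj chosen j hjc]
      have : clauseA adj (chosen.map (fun x => adj.getD x 0) ++ [adj.getD j 0]) = flipL adj (chosen ++ [j]) := by
        have hmap : chosen.map (fun x => adj.getD x 0) ++ [adj.getD j 0]
            = (chosen ++ [j]).map (fun x => adj.getD x 0) := by simp
        rw [hmap, clauseA_eq_flipL adj hnd (chosen ++ [j])]
        intro x hx
        rcases List.mem_append.mp hx with h | h
        · exact (hch x h).2
        · simp at h; omega
      rw [this]
  | succ m ih =>
    intro start chosen acc hch
    rw [emitB, combUtl]
    have hlen : adj.length + 1 - (m + 1 + 1) - start = adj.length - (m + 1) - start := by omega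
    simp only [reduceDIte, hlen]
    rw [foldl_step_shape _
        (fun j => (combUtl adj k m (j + 1) (chosen.map (fun x => adj.getD x 0) ++ [adj.getD j 0])).map (clauseA adj)) _ _ ?step acc]
    · simp [List.map_flatMap]
    case step =>
      intro j hj acc'
      have hjb := List.mem_range'_1.mp hj
      have hjn : j < adj.length := by omega
      have hjc : j ∉ chosen := fun hc => by have := hch j hc; omega
      simp only []
      rw [← flipL_append]
      have hch' : ∀ x ∈ chosen ++ [j], x < j + 1 ∧ x < adj.length := by
        intro x hx
        rcases List.mem_append.mp hx with h | h
        · have := hch x h; omega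
        · simp at h; omega
      rw [Nat.add_sub_cancel, ih (j + 1) (chosen ++ [j]) acc' hch']
      rw [flipL_set_back adj chosen j hjc]
      simp [List.map_append]
lemma emitB_zero (adj : List Int) (acc : List (List Int)) (start : Nat) :
    emitB adj (negL adj) 0 start (acc, negL adj) = (acc ++ [negL adj], negL adj) := by
  rw [emitB]; rfl

lemma clauseA_nil (adj : List Int) : clauseA adj [] = negL adj := by
  simp [clauseA, negL]

lemma emitB_get_comb (adj : List Int) (hnd : adj.Nodup) (i : Int) (hi : 0 ≤ i)
    (acc : List (List Int)) :
    emitB adj (negL adj) i.toNat 0 (acc, negL adj)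
      = (acc ++ (get_comb adj i).map (clauseA adj), negL adj) := by
  by_cases h0 : i = 0
  · subst h0
    rw [get_comb]
    simp only [if_pos rfl, Int.toNat_zero]
    rw [emitB_zero]
    simp [clauseA_nil]
  · have ht : i.toNat = (i.toNat - 1) + 1 := by omega
    rw [ht]
    refine (emitB_eq adj hnd i (i.toNat - 1) 0 [] acc (by simp)).trans ?_
    rw [get_comb, if_neg h0]
    have h2 : (i - 1).toNat = i.toNat - 1 := by omega
    rw [h2]
    rfl

theorem main_equal : ∀ (adj : List Int) (gre : Int),
    (adj.Nodup ∨ gre = 0 ∨ (adj.length : Int) - 1 ≤ gre) →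
    get_cons_clauses adj gre = get_cons_clauses_alt adj gre := by
  intro adj gre hpre
  by_cases hlen : gre = (adj.length : Int)
  · simp [get_cons_clauses, get_cons_clauses_alt, hlen]
  · by_cases h0 : gre = 0
    · simp [get_cons_clauses, get_cons_clauses_alt, h0, hlen]
    · simp only [get_cons_clauses, get_cons_clauses_alt, if_neg hlen, if_neg h0]
      have hneg : (adj.map fun a => -a) = negL adj := rfl
      rw [hneg]
      have hF : ∀ L : List Int, (∀ i ∈ L, (0:Int) ≤ i) → adj.Nodup →
          (L.foldl (fun st size => emitB adj (negL adj) size.toNat 0 st) ([], negL adj)).1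
          = L.flatMap (fun i => (get_comb adj i).map (clauseA adj)) := by
        intro L hL hnd
        rw [foldl_step_shape _ (fun i => (get_comb adj i).map (clauseA adj)) (negL adj) L
            (fun i hi acc => emitB_get_comb adj hnd i (hL i hi) acc) []]
        simp
      have hclA : ∀ L : List Int,
          L.flatMap (fun i => (get_comb adj i).map
            (fun comb => adj.map (fun a => if comb.contains a then a else -a)))
          = L.flatMap (fun i => (get_comb adj i).map (clauseA adj)) := by
        intro L; rfl
      rcases hpre with hnd | h0' | hge
      · rw [hF _ (fun i hi => (PySem.List.mem_pyRange_one.mp hi).1) hnd, hclA]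
      · exact absurd h0' h0
      · by_cases hle : (adj.length : Int) - gre ≤ 0
        · rw [PySem.List.pyRange_one_eq_nil hle]
          simp
        · have h1 : (adj.length : Int) - gre = 1 := by omega
          rw [h1, show PySem.List.pyRange 0 1 1 = [0] from by decide]
          simp only [List.flatMap_cons, List.flatMap_nil, List.foldl_cons, List.foldl_nil]
          rw [show ((0:Int).toNat) = 0 from rfl, emitB_zero adj [] 0]
          rw [get_comb, if_pos rfl]
          simp [negL]

-- ===== VERDICT (by name: the statement is the Claim_ definition above) =====
theorem get_cons_clauses_spec : Claim_equal_get_cons_clauses := by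
  unfold Claim_equal_get_cons_clauses Spec_get_cons_clauses Pre_get_cons_clauses
  intro adj gre _ hpre
  exact main_equal adj gre hpre
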